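-- pv_equiv track=rewrite | github.com/abdullahzulfiqar653/kizzuna-backend | api/serializers/chart/base.py | get_order_by_fields
-- ===== SOURCE A (Python) =====
-- def get_order_by_fields(group_by_field_mapping):
--     """
--     Get the order_by fields.
--     """
--     order_by_fields = [
--         (field, f"Order by {field} ascendingly")
--         for field in group_by_field_mapping.keys()
--     ]
--     order_by_fields += [("aggregate", f"Order by aggregated field ascendingly")]
--     order_by_fields += [
--         (f"-{field}", f"Order by {field} descendingly") for field, _ in order_by_fields
--     ]
--     return order_by_fields
-- ===== SOURCE B (Python) =====
-- def get_order_by_fields(group_by_field_mapping):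
--     """
--     Get the order_by fields.
--     """
--     ascending, descending = [], []
--     for field in group_by_field_mapping.keys():
--         ascending.append((field, f"Order by {field} ascendingly"))
--         descending.append((f"-{field}", f"Order by {field} descendingly"))
--     ascending.append(("aggregate", "Order by aggregated field ascendingly"))
--     descending.append(("-aggregate", "Order by aggregate descendingly"))
--     return ascending + descending
-- ===== Notes on version B (the rewrite author's own statement) =====
-- stated objective: simpler
-- what changed: B builds the ascending and descending tuple lists in one parallel pass over the keys and concatenates them, instead of A's build-combined-list-then-rescan-it second comprehension.
import Mathlib
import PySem

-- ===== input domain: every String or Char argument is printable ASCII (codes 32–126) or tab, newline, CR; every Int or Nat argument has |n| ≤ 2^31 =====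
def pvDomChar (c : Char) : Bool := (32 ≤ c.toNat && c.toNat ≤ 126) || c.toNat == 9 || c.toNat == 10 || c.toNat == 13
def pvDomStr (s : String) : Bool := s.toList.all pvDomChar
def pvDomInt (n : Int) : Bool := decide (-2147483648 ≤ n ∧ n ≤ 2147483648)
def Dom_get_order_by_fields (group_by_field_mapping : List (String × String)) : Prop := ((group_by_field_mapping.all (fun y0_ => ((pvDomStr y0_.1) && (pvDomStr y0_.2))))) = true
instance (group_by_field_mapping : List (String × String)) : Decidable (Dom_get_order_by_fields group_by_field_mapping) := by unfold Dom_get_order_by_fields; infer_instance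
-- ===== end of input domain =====

-- ===== PORT A =====
def get_order_by_fields (group_by_field_mapping : List (String × String)) : List (String × String) :=
  let keys := PySem.List.dedup (group_by_field_mapping.map (·.1))
  let order_by_fields := keys.map (fun field => (field, "Order by " ++ field ++ " ascendingly"))
  let order_by_fields := order_by_fields ++ [("aggregate", "Order by aggregated field ascendingly")]
  order_by_fields ++ order_by_fields.map (fun p => ("-" ++ p.1, "Order by " ++ p.1 ++ " descendingly"))

-- ===== PORT B =====
-- one pass over the keys building the ascending and descending lists in parallel
def altLoop (keys : List String) (asc desc : List (String × String)) : List (String × String) :=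
  match keys with
  | [] =>
      (asc ++ [("aggregate", "Order by aggregated field ascendingly")]) ++
      (desc ++ [("-aggregate", "Order by aggregate descendingly")])
  | field :: rest =>
      altLoop rest (asc ++ [(field, "Order by " ++ field ++ " ascendingly")])
                   (desc ++ [("-" ++ field, "Order by " ++ field ++ " descendingly")])

def get_order_by_fields_alt (group_by_field_mapping : List (String × String)) : List (String × String) :=
  altLoop (PySem.List.dedup (group_by_field_mapping.map (·.1))) [] []

-- ===== PRECONDITION & SPEC =====
def Spec_get_order_by_fields (group_by_field_mapping : List (String × String)) (out : List (String × String)) : Prop := out = get_order_by_fields_alt group_by_field_mapping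
instance (group_by_field_mapping : List (String × String)) (out : List (String × String)) : Decidable (Spec_get_order_by_fields group_by_field_mapping out) := by unfold Spec_get_order_by_fields; infer_instance

-- ===== CLAIM (what is proved, stated in full; the proofs are below) =====
def Claim_equal_get_order_by_fields : Prop := ∀ (group_by_field_mapping : List (String × String)), Dom_get_order_by_fields group_by_field_mapping → Spec_get_order_by_fields group_by_field_mapping (get_order_by_fields group_by_field_mapping)

-- ===== LEMMAS AND PROOFS =====

-- ===== VERDICT (by name: the statement is the Claim_ definition above) =====
theorem altLoop_spec (keys : List String) (asc desc : List (String × String)) :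
    altLoop keys asc desc =
      (asc ++ keys.map (fun f => (f, "Order by " ++ f ++ " ascendingly"))
           ++ [("aggregate", "Order by aggregated field ascendingly")]) ++
      (desc ++ keys.map (fun f => ("-" ++ f, "Order by " ++ f ++ " descendingly"))
           ++ [("-aggregate", "Order by aggregate descendingly")]) := by
  induction keys generalizing asc desc with
  | nil => simp [altLoop]
  | cons f rest ih => simp [altLoop, ih]

theorem get_order_by_fields_spec : Claim_equal_get_order_by_fields := by
  intro m _
  show get_order_by_fields m = get_order_by_fields_alt m
  simp [get_order_by_fields, get_order_by_fields_alt, altLoop_spec, List.map_append]
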